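-- pv_equiv track=rewrite | github.com/Lkeurentjes/Advent_of_code | 2025/2025-06-TrashCompactor/2025-06-TrashCompactor.py | MathHomework
-- ===== SOURCE A (Python) =====
-- import math
--
-- def MathHomework(lines):
--     Numbers = lines[:-1]
--     Operators = lines[-1]
--     result = 0
--     for i, operator in enumerate(Operators):
--         nums = [int(num[i]) for num in Numbers]
--         if operator == "+":
--             result += sum(nums)
--         if operator == "*":
--             result += math.prod(nums)
--     return result
-- ===== SOURCE B (Python) =====
-- def MathHomework(lines):
--     rows, ops = lines[:-1], lines[-1]
--     acc = [0 if op == "+" else 1 for op in ops]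
--     for row in rows:
--         for i, op in enumerate(ops):
--             d = int(row[i])
--             if op == "+":
--                 acc[i] += d
--             elif op == "*":
--                 acc[i] *= d
--     return sum(a for a, op in zip(acc, ops) if op in "+*")
-- ===== Notes on version B (the rewrite author's own statement) =====
-- stated objective: alternative
-- what changed: A's column-major pass (one full scan of all number rows per operator, building a fresh list each time) is replaced by a single row-major pass that maintains a per-column accumulator list (0-init for '+', 1-init for '*') and sums the accumulators of '+'/'*' columns at the end.
import Mathlib
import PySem

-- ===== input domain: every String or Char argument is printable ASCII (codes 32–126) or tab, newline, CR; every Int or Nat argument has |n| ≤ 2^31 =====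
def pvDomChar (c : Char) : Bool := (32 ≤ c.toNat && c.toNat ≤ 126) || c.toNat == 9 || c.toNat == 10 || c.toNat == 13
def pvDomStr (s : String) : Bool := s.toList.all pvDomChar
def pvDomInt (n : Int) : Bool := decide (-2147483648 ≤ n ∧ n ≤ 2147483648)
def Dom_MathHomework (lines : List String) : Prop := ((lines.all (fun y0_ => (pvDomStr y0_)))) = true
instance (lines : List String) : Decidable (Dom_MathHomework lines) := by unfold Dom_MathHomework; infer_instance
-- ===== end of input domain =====

-- B replaces A's column-major per-operator scans by a single row-major pass maintaining a
-- per-column accumulator list (alternative decomposition, same cost); proved equal under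
-- Pre_ (outside Pre_ the Python A raises).


-- ===== PORT A =====
-- int(num[i]) where num[i] is one ASCII digit (Pre_ guarantees this): its digit value.
def pvDigit (c : Char) : Int := (c.toNat : Int) - 48

def MathHomework (lines : List String) : Int :=
  let Numbers := PySem.List.slice lines none (some (-1))
  let Operators := PySem.List.pyGetD lines (-1) ""
  (PySem.List.enumerate Operators.toList 0).foldl
    (fun result p =>
      let nums := Numbers.map (fun num => pvDigit (PySem.List.pyGetD num.toList p.1 '0'))
      let r1 := if p.2 = '+' then result + nums.sum else result
      if p.2 = '*' then r1 + nums.prod else r1) 0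

-- ===== PORT B =====
def MathHomework_alt (lines : List String) : Int :=
  let rows := PySem.List.slice lines none (some (-1))
  let ops := (PySem.List.pyGetD lines (-1) "").toList
  let acc0 := ops.map (fun op => if op = '+' then (0 : Int) else 1)
  let acc := rows.foldl (fun acc row =>
    (PySem.List.enumerate ops 0).foldl (fun acc p =>
      let d := pvDigit (PySem.List.pyGetD row.toList p.1 '0')
      if p.2 = '+' then PySem.List.pySetD acc p.1 (PySem.List.pyGetD acc p.1 0 + d)
      else if p.2 = '*' then PySem.List.pySetD acc p.1 (PySem.List.pyGetD acc p.1 0 * d)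
      else acc) acc) acc0
  -- op in "+*" for a single character op is exactly op = '+' ∨ op = '*'
  (acc.zip ops).foldl (fun s p => if p.2 = '+' ∨ p.2 = '*' then s + p.1 else s) 0

-- ===== PRECONDITION & SPEC =====
-- Pre_ excludes exactly the inputs where Python A raises: the empty list (IndexError on
-- lines[-1]), a number row shorter than the operator line (IndexError on num[i]), and a
-- non-digit character in an indexed column (ValueError in int()).
def Pre_MathHomework (lines : List String) : Prop :=
  lines ≠ [] ∧
  (lines.dropLast.all (fun num =>
     decide ((lines.getLast?.getD "").toList.length ≤ num.toList.length) &&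
     (num.toList.take (lines.getLast?.getD "").toList.length).all Char.isDigit)) = true
instance (lines : List String) : Decidable (Pre_MathHomework lines) := by
  unfold Pre_MathHomework; infer_instance

def pvWitness_MathHomework : List String := ["12", "34", "+*"]

def Spec_MathHomework (lines : List String) (out : Int) : Prop := out = MathHomework_alt lines
instance (lines : List String) (out : Int) : Decidable (Spec_MathHomework lines out) := by unfold Spec_MathHomework; infer_instance

-- ===== CLAIM (what is proved, stated in full; the proofs are below) =====
def Claim_equal_MathHomework : Prop := ∀ (lines : List String), Dom_MathHomework lines → Pre_MathHomework lines → Spec_MathHomework lines (MathHomework lines)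

-- ===== LEMMAS AND PROOFS =====
-- proof-side vocabulary
def pvDcol (row : String) (i : Int) : Int := pvDigit (PySem.List.pyGetD row.toList i '0')

def pvStep (row : String) (p : Int × Char) (a : Int) : Int :=
  if p.2 = '+' then a + pvDcol row p.1 else if p.2 = '*' then a * pvDcol row p.1 else a

def pvInnerBody (row : String) (acc : List Int) (p : Int × Char) : List Int :=
  let d := pvDigit (PySem.List.pyGetD row.toList p.1 '0')
  if p.2 = '+' then PySem.List.pySetD acc p.1 (PySem.List.pyGetD acc p.1 0 + d)
  else if p.2 = '*' then PySem.List.pySetD acc p.1 (PySem.List.pyGetD acc p.1 0 * d)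
  else acc

def pvCol (numbers : List String) (i : Int) : List Int := numbers.map (fun num => pvDcol num i)

def pvFA (numbers : List String) (p : Int × Char) : Int :=
  if p.2 = '+' then (pvCol numbers p.1).sum else if p.2 = '*' then (pvCol numbers p.1).prod else 0

-- B's inner loop over one row: it rewrites the segment of the accumulator from position s
-- pointwise by pvStep (s = length of the untouched prefix pre).
theorem pv_inner (row : String) (ops : List Char) :
    ∀ (s : Nat) (pre : List Int) (g : Int × Char → Int), pre.length = s →
    (PySem.List.enumerate ops (s : Int)).foldl (pvInnerBody row)
      (pre ++ (PySem.List.enumerate ops (s : Int)).map g)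
    = pre ++ (PySem.List.enumerate ops (s : Int)).map (fun p => pvStep row p (g p)) := by
  induction ops with
  | nil => intro s pre g h; simp [PySem.List.enumerate_nil]
  | cons c ops ih =>
    intro s pre g h
    rw [PySem.List.enumerate_cons]
    have hc : (s : Int) + 1 = ((s + 1 : Nat) : Int) := by push_cast; ring
    simp only [List.map_cons, List.foldl_cons]
    have hbody : pvInnerBody row (pre ++ g ((s : Int), c) :: (PySem.List.enumerate ops ((s:Int)+1)).map g) ((s : Int), c)
        = (pre ++ [pvStep row ((s:Int), c) (g ((s:Int), c))]) ++ (PySem.List.enumerate ops ((s:Int)+1)).map g := by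
      subst h
      simp only [pvInnerBody, pvStep]
      split_ifs <;> simp [pvDcol]
    rw [hbody, hc]
    rw [ih (s+1) (pre ++ [pvStep row ((s:Int), c) (g ((s:Int), c))]) g (by simp [h])]
    simp [List.append_assoc]

-- B's outer loop: a row-major fold of pointwise-independent updates is the column-wise fold.
theorem pv_outer (ops : List Char) :
    ∀ (rows : List String) (g : Int × Char → Int),
    rows.foldl (fun acc row => (PySem.List.enumerate ops 0).foldl (pvInnerBody row) acc)
      ((PySem.List.enumerate ops 0).map g)
    = (PySem.List.enumerate ops 0).map
        (fun p => rows.foldl (fun a row => pvStep row p a) (g p)) := by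
  intro rows
  induction rows with
  | nil => intro g; simp
  | cons row rows ih =>
    intro g
    simp only [List.foldl_cons]
    have h0 : (0 : Int) = ((0 : Nat) : Int) := by norm_num
    have hin := pv_inner row ops 0 [] g rfl
    simp only [List.nil_append] at hin
    rw [h0, hin]
    simpa using ih (fun p => pvStep row p (g p))

-- A's loop as a sum over the enumeration.
theorem pv_afold (numbers : List String) :
    ∀ (l : List (Int × Char)) (r : Int),
    l.foldl (fun result p =>
      let nums := numbers.map (fun num => pvDigit (PySem.List.pyGetD num.toList p.1 '0'))
      let r1 := if p.2 = '+' then result + nums.sum else result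
      if p.2 = '*' then r1 + nums.prod else r1) r
    = r + (l.map (pvFA numbers)).sum := by
  intro l
  induction l with
  | nil => intro r; simp
  | cons p l ih =>
    intro r
    simp only [List.foldl_cons, List.map_cons, List.sum_cons, ih]
    simp only [pvFA, pvCol, pvDcol]
    split_ifs with h1 h2
    · exact absurd (h1 ▸ h2) (by decide)
    · ring
    · ring
    · ring

theorem pv_zip_enum {β : Type} (l : List Char) (f : Int × Char → β) (s : Int) :
    ((PySem.List.enumerate l s).map f).zip l
      = (PySem.List.enumerate l s).map (fun p => (f p, p.2)) := by
  induction l generalizing s with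
  | nil => simp [PySem.List.enumerate_nil]
  | cons a l ih => simp [PySem.List.enumerate_cons, ih]

theorem pv_ite_fold {α : Type} (P : α → Prop) [DecidablePred P] (v : α → Int) :
    ∀ (l : List α) (r : Int),
    l.foldl (fun s x => if P x then s + v x else s) r
      = r + (l.map (fun x => if P x then v x else 0)).sum := by
  intro l
  induction l with
  | nil => intro r; simp
  | cons a l ih =>
    intro r
    simp only [List.foldl_cons, List.map_cons, List.sum_cons, ih]
    split_ifs <;> ring

theorem MathHomework_eq_alt (lines : List String) : MathHomework lines = MathHomework_alt lines := by
  set rows := PySem.List.slice lines none (some (-1)) with hrows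
  set ops := (PySem.List.pyGetD lines (-1) "").toList with hops
  have hacc0 : ops.map (fun op => if op = '+' then (0 : Int) else 1)
      = (PySem.List.enumerate ops 0).map (fun p => if p.2 = '+' then (0 : Int) else 1) := by
    conv_lhs => rw [← PySem.List.map_snd_enumerate ops 0]
    rw [List.map_map]
    rfl
  -- A's loop as a sum over the enumeration (defeq to the port's foldl)
  have hA : MathHomework lines
      = 0 + ((PySem.List.enumerate ops 0).map (pvFA rows)).sum :=
    pv_afold rows (PySem.List.enumerate ops 0) 0
  -- B's row loop, rephrased by pv_outer (pvInnerBody is defeq to the port's inner lambda)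
  have hB : MathHomework_alt lines
      = (((PySem.List.enumerate ops 0).map
            (fun p => rows.foldl (fun a row => pvStep row p a)
              (if p.2 = '+' then (0 : Int) else 1))).zip ops).foldl
          (fun s p => if p.2 = '+' ∨ p.2 = '*' then s + p.1 else s) 0 := by
    show (((rows.foldl (fun acc row => (PySem.List.enumerate ops 0).foldl (pvInnerBody row) acc)
            (ops.map (fun op => if op = '+' then (0 : Int) else 1))).zip ops).foldl
          (fun s p => if p.2 = '+' ∨ p.2 = '*' then s + p.1 else s) 0) = _
    rw [hacc0, pv_outer]
  rw [hA, hB]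
  rw [pv_zip_enum]
  rw [pv_ite_fold (fun p : Int × Char => p.2 = '+' ∨ p.2 = '*') (fun p => p.1)]
  rw [List.map_map]
  congr 1
  refine congrArg List.sum ?_
  refine List.map_congr_left ?_
  intro p _
  simp only [Function.comp_apply]
  by_cases h1 : p.2 = '+'
  · simp only [pvFA, pvStep, h1, if_pos, true_or]
    rw [PySem.List.foldl_add rows (fun row => pvDcol row p.1)]
    simp [pvCol]
  · by_cases h2 : p.2 = '*'
    · have hne : ('*' : Char) = '+' ↔ False := by simp
      simp only [pvFA, pvStep, pvCol, h2, or_true, if_neg, if_pos, not_false_iff, hne,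
        List.prod_eq_foldl, List.foldl_map]
    · simp [pvFA, h1, h2]

-- ===== VERDICT (by name: the statement is the Claim_ definition above) =====
theorem MathHomework_spec : Claim_equal_MathHomework := by
  intro lines _ _
  exact MathHomework_eq_alt lines
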